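-- pv_equiv track=rewrite | github.com/Aman876703/password-analyzer | ml-services/train_model.py | has_sequence
-- ===== SOURCE A (Python) =====
-- def has_sequence(password):
--     password = password.lower()
--     for i in range(len(password) - 2):
--         if ord(password[i]) + 1 == ord(password[i+1]) and ord(password[i+1]) + 1 == ord(password[i+2]):
--             return True
--         if ord(password[i]) - 1 == ord(password[i+1]) and ord(password[i+1]) - 1 == ord(password[i+2]):
--             return True
--     return False
-- ===== SOURCE B (Python) =====
-- def has_sequence(password):
--     p = password.lower()
--     for k in range(32, 125):
--         asc = chr(k) + chr(k + 1) + chr(k + 2)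
--         desc = chr(k + 2) + chr(k + 1) + chr(k)
--         if asc in p or desc in p:
--             return True
--     return False
-- ===== Notes on version B (the rewrite author's own statement) =====
-- stated objective: alternative
-- what changed: Instead of A's scan over the password's character triples, B enumerates the 93 fixed 3-character ascending runs of the printable-ASCII range (and their descending reversals) and tests each pattern for substring containment in the lowered password.
import Mathlib
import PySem

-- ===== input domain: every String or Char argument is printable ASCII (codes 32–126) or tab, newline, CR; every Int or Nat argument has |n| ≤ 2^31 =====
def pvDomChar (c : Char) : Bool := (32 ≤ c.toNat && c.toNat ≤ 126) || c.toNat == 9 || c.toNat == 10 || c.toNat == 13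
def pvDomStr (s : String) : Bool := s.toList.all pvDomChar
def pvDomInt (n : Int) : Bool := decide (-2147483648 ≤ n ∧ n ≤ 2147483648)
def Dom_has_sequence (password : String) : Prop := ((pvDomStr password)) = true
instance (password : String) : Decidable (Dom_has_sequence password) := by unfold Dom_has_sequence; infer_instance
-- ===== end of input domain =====

-- B replaces A's scan of character triples by enumerating the fixed set of 3-char ascending
-- runs of the printable-ASCII range and their reversals and testing each for substring
-- containment in the lowered password (objective: alternative algorithm; claim holds on Dom).

-- ===== PORT A =====
-- A's index loop over triples password[i], password[i+1], password[i+2] with early return,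
-- as structural recursion over the lowered character list.
def hsA_loop : List Char → Bool
  | c1 :: c2 :: c3 :: rest =>
      if c1.toNat + 1 = c2.toNat ∧ c2.toNat + 1 = c3.toNat then true
      else if (c1.toNat : Int) - 1 = (c2.toNat : Int) ∧ (c2.toNat : Int) - 1 = (c3.toNat : Int) then true
      else hsA_loop (c2 :: c3 :: rest)
  | _ => false

def has_sequence (password : String) : Bool :=
  hsA_loop (PySem.Str.lower password).toList

-- ===== PORT B =====
-- B enumerates every 3-character ascending run "chr(k)chr(k+1)chr(k+2)" of the printable-ASCII
-- range (k in range(32,125)) and its descending reversal, and asks whether any of these fixed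
-- patterns is a substring of the lowered password ('in' = substring test).
def has_sequence_alt (password : String) : Bool :=
  let p := PySem.Chars.lower password.toList
  (PySem.List.pyRange 32 125).any (fun k =>
    PySem.Chars.isIn [Char.ofNat k.toNat, Char.ofNat (k.toNat + 1), Char.ofNat (k.toNat + 2)] p ||
    PySem.Chars.isIn [Char.ofNat (k.toNat + 2), Char.ofNat (k.toNat + 1), Char.ofNat k.toNat] p)

-- ===== PRECONDITION & SPEC =====
def Spec_has_sequence (password : String) (out : Bool) : Prop := out = has_sequence_alt password
instance (password : String) (out : Bool) : Decidable (Spec_has_sequence password out) := by unfold Spec_has_sequence; infer_instance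

-- ===== CLAIM (what is proved, stated in full; the proofs are below) =====
def Claim_equal_has_sequence : Prop := ∀ (password : String), Dom_has_sequence password → Spec_has_sequence password (has_sequence password)

-- ===== LEMMAS AND PROOFS =====

theorem chr_toNat_small (n : Nat) (h : n < 55000) : (Char.ofNat n).toNat = n := by
  rw [Char.toNat_ofNat]
  simp only [Nat.isValidChar]
  rw [if_pos (Or.inl (by omega))]

-- lowering a domain character keeps it in the domain
theorem dom_lowerChar (c : Char) (h : pvDomChar c = true) :
    pvDomChar (PySem.Chars.lowerChar c) = true := by
  unfold PySem.Chars.lowerChar PySem.Chars.isupper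
  split
  · next hu =>
      simp only [Bool.and_eq_true, decide_eq_true_eq] at hu
      have h65 : 65 ≤ c.toNat := hu.1
      have h90 : c.toNat ≤ 90 := hu.2
      simp only [pvDomChar, chr_toNat_small (c.toNat + 32) (by omega)]
      simp only [Bool.or_eq_true, Bool.and_eq_true, decide_eq_true_eq, beq_iff_eq]
      omega
  · exact h

-- characterisation of A's scan: a consecutive triple with step +1 or step -1 exists
theorem hsA_iff (l : List Char) : hsA_loop l = true ↔
    ∃ a b c : Char, [a, b, c] <:+: l ∧
      ((a.toNat + 1 = b.toNat ∧ b.toNat + 1 = c.toNat) ∨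
       (b.toNat + 1 = a.toNat ∧ c.toNat + 1 = b.toNat)) := by
  match l with
  | [] =>
      exact iff_of_false Bool.false_ne_true
        (by rintro ⟨a, b, c, hinf, -⟩; simpa using hinf.length_le)
  | [d] =>
      exact iff_of_false Bool.false_ne_true
        (by rintro ⟨a, b, c, hinf, -⟩; simpa using hinf.length_le)
  | [d1, d2] =>
      exact iff_of_false Bool.false_ne_true
        (by rintro ⟨a, b, c, hinf, -⟩; simpa using hinf.length_le)
  | c1 :: c2 :: c3 :: rest =>
      have ih := hsA_iff (c2 :: c3 :: rest)
      simp only [hsA_loop]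
      split
      · next hP =>
          simp only [true_iff]
          exact ⟨c1, c2, c3, ⟨[], rest, rfl⟩, Or.inl hP⟩
      · next hP =>
          split
          · next hQ =>
              simp only [true_iff]
              exact ⟨c1, c2, c3, ⟨[], rest, rfl⟩, Or.inr (by omega)⟩
          · next hQ =>
              rw [ih]
              constructor
              · rintro ⟨a, b, c, hinf, hc⟩
                exact ⟨a, b, c, hinf.trans (List.suffix_cons c1 _).isInfix, hc⟩
              · rintro ⟨a, b, c, hinf, hc⟩
                rcases List.infix_cons_iff.mp hinf with hpre | htail
                · obtain ⟨h1, hpre2⟩ := List.cons_prefix_cons.mp hpre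
                  obtain ⟨h2, hpre3⟩ := List.cons_prefix_cons.mp hpre2
                  obtain ⟨h3, -⟩ := List.cons_prefix_cons.mp hpre3
                  rw [h1, h2, h3] at hc
                  exfalso
                  rcases hc with hc | hc
                  · exact hP hc
                  · exact hQ ⟨by omega, by omega⟩
                · exact ⟨a, b, c, htail, hc⟩

-- characterisation of B's pattern search
theorem hsB_iff (p : List Char) : (PySem.List.pyRange 32 125).any (fun k =>
    PySem.Chars.isIn [Char.ofNat k.toNat, Char.ofNat (k.toNat + 1), Char.ofNat (k.toNat + 2)] p ||
    PySem.Chars.isIn [Char.ofNat (k.toNat + 2), Char.ofNat (k.toNat + 1), Char.ofNat k.toNat] p) = true ↔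
    ∃ n : Nat, 32 ≤ n ∧ n < 125 ∧
      ([Char.ofNat n, Char.ofNat (n + 1), Char.ofNat (n + 2)] <:+: p ∨
       [Char.ofNat (n + 2), Char.ofNat (n + 1), Char.ofNat n] <:+: p) := by
  rw [List.any_eq_true]
  constructor
  · rintro ⟨k, hk, hcond⟩
    rw [PySem.List.mem_pyRange_one] at hk
    refine ⟨k.toNat, by omega, by omega, ?_⟩
    rcases Bool.or_eq_true_iff.mp hcond with h | h
    · exact Or.inl ((PySem.Chars.isIn_iff_infix _ _).mp h)
    · exact Or.inr ((PySem.Chars.isIn_iff_infix _ _).mp h)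
  · rintro ⟨n, h1, h2, hcond⟩
    refine ⟨(n : Int), PySem.List.mem_pyRange_one.mpr ⟨by omega, by omega⟩, ?_⟩
    have hn : ((n : Int)).toNat = n := Int.toNat_natCast n
    rw [hn]
    rcases hcond with h | h
    · exact Bool.or_eq_true_iff.mpr (Or.inl ((PySem.Chars.isIn_iff_infix _ _).mpr h))
    · exact Bool.or_eq_true_iff.mpr (Or.inr ((PySem.Chars.isIn_iff_infix _ _).mpr h))

-- main bridge on a domain-only character list
theorem main_eq (p : List Char) (hd : ∀ c ∈ p, pvDomChar c = true) :
    hsA_loop p = (PySem.List.pyRange 32 125).any (fun k =>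
      PySem.Chars.isIn [Char.ofNat k.toNat, Char.ofNat (k.toNat + 1), Char.ofNat (k.toNat + 2)] p ||
      PySem.Chars.isIn [Char.ofNat (k.toNat + 2), Char.ofNat (k.toNat + 1), Char.ofNat k.toNat] p) := by
  cases hA : hsA_loop p
  · symm
    rw [Bool.eq_false_iff]
    intro hB
    obtain ⟨n, h32, h125, hinf⟩ := (hsB_iff p).mp hB
    have e0 : (Char.ofNat n).toNat = n := chr_toNat_small n (by omega)
    have e1 : (Char.ofNat (n + 1)).toNat = n + 1 := chr_toNat_small _ (by omega)
    have e2 : (Char.ofNat (n + 2)).toNat = n + 2 := chr_toNat_small _ (by omega)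
    rw [Bool.eq_false_iff] at hA
    apply hA
    rw [hsA_iff]
    rcases hinf with hinf | hinf
    · exact ⟨_, _, _, hinf, Or.inl (by rw [e0, e1, e2]; omega)⟩
    · exact ⟨_, _, _, hinf, Or.inr (by rw [e0, e1, e2]; omega)⟩
  · symm
    obtain ⟨a, b, c, hinf, hc⟩ := (hsA_iff p).mp hA
    have hmem : ∀ x ∈ [a, b, c], pvDomChar x = true := fun x hx => hd x (hinf.subset hx)
    have hda := hmem a (by simp); have hdb := hmem b (by simp); have hdc := hmem c (by simp)
    simp only [pvDomChar, Bool.or_eq_true, Bool.and_eq_true, decide_eq_true_eq, beq_iff_eq]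
      at hda hdb hdc
    rw [hsB_iff]
    rcases hc with hc | hc
    · refine ⟨a.toNat, by omega, by omega, Or.inl ?_⟩
      rw [show a.toNat + 1 = b.toNat by omega, show a.toNat + 2 = c.toNat by omega,
        Char.ofNat_toNat, Char.ofNat_toNat, Char.ofNat_toNat]
      exact hinf
    · refine ⟨c.toNat, by omega, by omega, Or.inr ?_⟩
      rw [show c.toNat + 1 = b.toNat by omega, show c.toNat + 2 = a.toNat by omega,
        Char.ofNat_toNat, Char.ofNat_toNat, Char.ofNat_toNat]
      exact hinf

-- ===== VERDICT (by name: the statement is the Claim_ definition above) =====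
theorem has_sequence_spec : Claim_equal_has_sequence := by
  intro password hdom
  unfold Spec_has_sequence has_sequence has_sequence_alt
  simp only [PySem.Str.toList_lower]
  apply main_eq
  intro c hc
  simp only [PySem.Chars.lower, List.mem_map] at hc
  obtain ⟨c0, hc0, rfl⟩ := hc
  exact dom_lowerChar c0 (by
    have := hdom
    unfold Dom_has_sequence pvDomStr at this
    exact List.all_eq_true.mp this c0 hc0)
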